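-- pv_equiv track=rewrite | github.com/linzyk86/python-basics-1 | src/problems.py | oddNumbersBeforeZero
-- ===== SOURCE A (Python) =====
-- def oddNumbersBeforeZero(sequence):
--
--     result = 0
--     for i in range(0, len(sequence)):
--         if sequence[i] == 0:
--             break
--         if sequence[i] % 2 == 1:
--             result += 1
--     return result
-- ===== SOURCE B (Python) =====
-- def oddNumbersBeforeZero(sequence):
--     try:
--         idx = sequence.index(0)
--     except ValueError:
--         idx = len(sequence)
--     return sum(1 for x in sequence[:idx] if x % 2 == 1)
-- ===== Notes on version B (the rewrite author's own statement) =====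
-- stated objective: alternative
-- what changed: Replaces the fused indexed loop-with-break by a two-pass decomposition: first locate the first zero with list.index (falling back to len), then count odds over the prefix slice with a generator sum.
import Mathlib
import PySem

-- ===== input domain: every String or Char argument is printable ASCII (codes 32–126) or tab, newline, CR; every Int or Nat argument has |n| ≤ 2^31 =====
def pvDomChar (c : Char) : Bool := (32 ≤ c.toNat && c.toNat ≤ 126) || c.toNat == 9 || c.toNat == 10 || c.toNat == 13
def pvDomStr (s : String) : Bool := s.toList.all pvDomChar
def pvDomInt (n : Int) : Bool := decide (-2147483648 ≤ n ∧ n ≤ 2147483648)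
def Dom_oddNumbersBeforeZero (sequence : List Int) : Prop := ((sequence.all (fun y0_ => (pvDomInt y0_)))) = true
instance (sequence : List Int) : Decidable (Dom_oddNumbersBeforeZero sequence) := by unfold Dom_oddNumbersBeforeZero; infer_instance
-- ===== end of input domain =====

-- B replaces A's single loop-with-break by find-first-zero-then-count-over-prefix (alternative decomposition, same cost).
-- ===== PORT A =====
-- A's for-loop with break, as structural recursion over the same state (result accumulates, break stops).
def oddNumbersBeforeZero (sequence : List Int) : Int :=
  match sequence with
  | [] => 0
  | x :: xs =>
    if x == 0 then 0
    else (if PySem.Int.mod x 2 == 1 then 1 else 0) + oddNumbersBeforeZero xs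

-- ===== PORT B =====
-- idx = sequence.index(0) with fallback len(sequence); then sum over sequence[:idx].
def oddNumbersBeforeZero_alt (sequence : List Int) : Int :=
  let idx : Nat := (PySem.List.index? sequence 0).getD sequence.length
  ((PySem.List.slice sequence none (some (idx : Int))).filter
    (fun x => PySem.Int.mod x 2 == 1)).length

-- ===== PRECONDITION & SPEC =====
def Spec_oddNumbersBeforeZero (sequence : List Int) (out : Int) : Prop := out = oddNumbersBeforeZero_alt sequence
instance (sequence : List Int) (out : Int) : Decidable (Spec_oddNumbersBeforeZero sequence out) := by unfold Spec_oddNumbersBeforeZero; infer_instance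

-- ===== CLAIM (what is proved, stated in full; the proofs are below) =====
def Claim_equal_oddNumbersBeforeZero : Prop := ∀ (sequence : List Int), Dom_oddNumbersBeforeZero sequence → Spec_oddNumbersBeforeZero sequence (oddNumbersBeforeZero sequence)

-- ===== LEMMAS AND PROOFS =====

-- ===== VERDICT (by name: the statement is the Claim_ definition above) =====
theorem alt_nil : oddNumbersBeforeZero_alt [] = 0 := by decide

theorem alt_cons (x : Int) (xs : List Int) :
    oddNumbersBeforeZero_alt (x :: xs) =
      if x == 0 then 0
      else (if PySem.Int.mod x 2 == 1 then 1 else 0) + oddNumbersBeforeZero_alt xs := by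
  by_cases hx : x = 0
  · subst hx
    simp [oddNumbersBeforeZero_alt]
  · have hi : PySem.List.index? (x :: xs) 0 = (PySem.List.index? xs 0).map (· + 1) :=
      PySem.List.index?_cons_of_ne xs hx
    have hidx : ((PySem.List.index? (x :: xs) 0).getD (x :: xs).length)
        = ((PySem.List.index? xs 0).getD xs.length) + 1 := by
      rw [hi]
      cases PySem.List.index? xs 0 <;> simp
    simp only [oddNumbersBeforeZero_alt, hidx]
    rw [PySem.List.slice_to_natCast, PySem.List.slice_to_natCast]
    simp only [PySem.Int.mod, List.take_succ_cons, List.filter_cons]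
    by_cases hodd : x.fmod 2 = 1
    · simp only [hodd, if_pos, beq_iff_eq, List.length_cons, if_neg hx]
      push_cast
      ring
    · simp [hodd, hx]

theorem a_eq_alt (sequence : List Int) :
    oddNumbersBeforeZero sequence = oddNumbersBeforeZero_alt sequence := by
  induction sequence with
  | nil => simp [oddNumbersBeforeZero, alt_nil]
  | cons x xs ih =>
    rw [alt_cons, oddNumbersBeforeZero]
    by_cases hx : x == 0 <;> simp [hx, ih]

theorem oddNumbersBeforeZero_spec : Claim_equal_oddNumbersBeforeZero := by
  intro sequence _
  exact a_eq_alt sequence
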